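-- pv_equiv track=rewrite | github.com/COTILab/autobidsify | universal_core.py | _select_preferred_file
-- ===== SOURCE A (Python) =====
-- from typing import Dict, List, Set, Tuple, Any, Optional
--
-- def _select_preferred_file(files: List[str]) -> str:
--     """
--     Select best file from duplicates.
--
--     Priority:
--     1. NIfTI over BRIK
--     2. Shortest path (usually the main file)
--     3. First alphabetically (for determinism)
--     """
--     if not files:
--         return None
--
--     if len(files) == 1:
--         return files[0]
--
--     # Filter: exclude BRIK
--     non_brik = [f for f in files if 'BRIK' not in f.upper()]
--     if non_brik:
--         files = non_brik
--
--     # Filter: prefer NIfTI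
--     nifti_files = [f for f in files if 'NIFTI' in f.upper()]
--     if nifti_files:
--         files = nifti_files
--
--     # Select shortest path
--     return sorted(files, key=lambda x: (len(x), x))[0]
-- ===== SOURCE B (Python) =====
-- from typing import List
--
-- def _select_preferred_file(files: List[str]) -> str:
--     """Single-pass minimum under a composite priority key: non-BRIK first,
--     then NIfTI, then shortest path, then alphabetical."""
--     if not files:
--         return None
--
--     def key(f):
--         u = f.upper()
--         return ('BRIK' in u, 'NIFTI' not in u, len(f), f)
--
--     best = files[0]
--     for f in files[1:]:
--         if key(f) < key(best):
--             best = f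
--     return best
-- ===== Notes on version B (the rewrite author's own statement) =====
-- stated objective: faster
-- what changed: Replaced the two conditional filter passes plus a (len, name) sort with a single left-to-right pass keeping the minimum under one composite lexicographic key ('BRIK' in f.upper(), 'NIFTI' not in f.upper(), len(f), f).
import Mathlib
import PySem

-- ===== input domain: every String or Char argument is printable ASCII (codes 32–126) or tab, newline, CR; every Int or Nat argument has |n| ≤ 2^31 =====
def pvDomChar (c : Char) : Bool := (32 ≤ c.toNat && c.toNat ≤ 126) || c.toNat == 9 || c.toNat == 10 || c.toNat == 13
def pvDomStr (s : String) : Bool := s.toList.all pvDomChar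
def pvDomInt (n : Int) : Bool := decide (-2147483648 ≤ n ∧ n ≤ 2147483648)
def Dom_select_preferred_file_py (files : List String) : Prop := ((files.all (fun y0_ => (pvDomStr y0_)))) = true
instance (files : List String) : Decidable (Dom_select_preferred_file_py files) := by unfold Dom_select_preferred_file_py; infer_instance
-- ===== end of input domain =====

-- B replaces A's two conditional filter passes plus a (len, name) sort by a single
-- pass keeping the minimum under one composite priority key (objective: faster,
-- measured).

-- ===== PORT A =====
def select_preferred_file_py (files : List String) : Option String :=
  if files = [] then none
  else if files.length = 1 then PySem.List.pyGet? files 0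
  else
    let non_brik := files.filter (fun f => !(PySem.Str.isIn "BRIK" (PySem.Str.upper f)))
    let files1 := if non_brik ≠ [] then non_brik else files
    let nifti_files := files1.filter (fun f => PySem.Str.isIn "NIFTI" (PySem.Str.upper f))
    let files2 := if nifti_files ≠ [] then nifti_files else files1
    PySem.List.pyGet? (PySem.List.sorted2 files2 (fun x => PySem.Str.len x) (fun x => x)) 0

-- ===== PORT B =====
-- key(f) = ('BRIK' in f.upper(), 'NIFTI' not in f.upper(), len(f), f)
def pvKey (f : String) : Bool × Bool × Int × String :=
  let u := PySem.Str.upper f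
  (PySem.Str.isIn "BRIK" u, !(PySem.Str.isIn "NIFTI" u), PySem.Str.len f, f)

-- Python's lexicographic `<` on the 4-tuple key
def pvKeyLt : Bool × Bool × Int × String → Bool × Bool × Int × String → Bool
  | (a1, a2, a3, a4), (b1, b2, b3, b4) =>
    (!a1 && b1) ||
      (a1 == b1 && ((!a2 && b2) ||
        (a2 == b2 && (decide (a3 < b3) || (a3 == b3 && decide (a4 < b4))))))

def select_preferred_file_py_alt (files : List String) : Option String :=
  match files with
  | [] => none
  | x :: t =>
      some (t.foldl (fun best f => if pvKeyLt (pvKey f) (pvKey best) then f else best) x)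

-- ===== PRECONDITION & SPEC =====
def Spec_select_preferred_file_py (files : List String) (out : Option String) : Prop := out = select_preferred_file_py_alt files
instance (files : List String) (out : Option String) : Decidable (Spec_select_preferred_file_py files out) := by unfold Spec_select_preferred_file_py; infer_instance

-- ===== CLAIM (what is proved, stated in full; the proofs are below) =====
def Claim_equal_select_preferred_file_py : Prop := ∀ (files : List String), Dom_select_preferred_file_py files → Spec_select_preferred_file_py files (select_preferred_file_py files)

-- ===== LEMMAS AND PROOFS =====

-- the key order, seen through a genuine lexicographic linear order
def pvEmb : Bool × Bool × Int × String → Lex (Bool × Lex (Bool × Lex (Int × String))) :=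
  fun k => toLex (k.1, toLex (k.2.1, toLex (k.2.2.1, k.2.2.2)))

lemma pvKeyLt_eq (k l : Bool × Bool × Int × String) :
    pvKeyLt k l = decide (pvEmb k < pvEmb l) := by
  rcases k with ⟨a1, a2, a3, a4⟩
  rcases l with ⟨b1, b2, b3, b4⟩
  rw [Bool.eq_iff_iff]
  simp only [pvKeyLt, pvEmb, Bool.or_eq_true, Bool.and_eq_true,
    Bool.not_eq_true', beq_iff_eq, decide_eq_true_eq, Prod.Lex.toLex_lt_toLex,
    Bool.lt_iff]

lemma pvEmb_inj (k l : Bool × Bool × Int × String) (h : pvEmb k = pvEmb l) : k = l := by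
  rcases k with ⟨a1, a2, a3, a4⟩
  rcases l with ⟨b1, b2, b3, b4⟩
  simpa [pvEmb, Prod.ext_iff] using h

lemma pvKeyLt_connex (k l : Bool × Bool × Int × String)
    (h1 : pvKeyLt k l = false) (h2 : pvKeyLt l k = false) : k = l := by
  rw [pvKeyLt_eq] at h1 h2
  simp only [decide_eq_false_iff_not, not_lt] at h1 h2
  exact pvEmb_inj _ _ (le_antisymm h2 h1)

-- generic facts about a boolean comparator that is `decide (e · < e ·)` for a linear order
theorem pvBefore_irrefl {α β : Type} [LinearOrder β] (e : α → β) (before : α → α → Bool)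
    (h : ∀ a b, before a b = decide (e a < e b)) (a : α) : before a a = false := by
  rw [h]; simp

theorem pvBefore_asymm {α β : Type} [LinearOrder β] (e : α → β) (before : α → α → Bool)
    (h : ∀ a b, before a b = decide (e a < e b)) (a b : α)
    (hab : before a b = true) : before b a = false := by
  rw [h] at hab ⊢; simp only [decide_eq_true_eq] at hab
  simp [not_lt.mpr hab.le]

theorem pvBefore_trans_neg {α β : Type} [LinearOrder β] (e : α → β) (before : α → α → Bool)
    (h : ∀ a b, before a b = decide (e a < e b)) (a b c : α)
    (hab : before a b = true) (hcb : before c b = false) : before c a = false := by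
  rw [h] at hab hcb ⊢
  simp only [decide_eq_true_eq, decide_eq_false_iff_not, not_lt] at hab hcb
  simp [not_lt.mpr (hab.le.trans hcb)]

-- insertBy with such a comparator keeps the "head is minimal" pairwise invariant
theorem pvPairwise_insertBy {α β : Type} [LinearOrder β] (e : α → β) (before : α → α → Bool)
    (h : ∀ a b, before a b = decide (e a < e b)) (x : α) :
    ∀ (ys : List α), ys.Pairwise (fun a b => before b a = false) →
      (PySem.List.insertBy before x ys).Pairwise (fun a b => before b a = false) := by
  intro ys
  induction ys with
  | nil => intro _; simp [PySem.List.insertBy]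
  | cons y ys ih =>
      intro hp
      rw [List.pairwise_cons] at hp
      obtain ⟨hy, hys⟩ := hp
      show (if before x y = true then x :: y :: ys else y :: PySem.List.insertBy before x ys).Pairwise _
      by_cases hxy : before x y = true
      · simp only [hxy, if_true]
        refine List.Pairwise.cons ?_ (List.Pairwise.cons hy hys)
        intro w hw
        rcases List.mem_cons.mp hw with rfl | hw
        · exact pvBefore_asymm e before h _ _ hxy
        · exact pvBefore_trans_neg e before h x y w hxy (hy w hw)
      · simp only [hxy]
        refine List.Pairwise.cons ?_ (ih hys)
        intro w hw
        rcases (PySem.List.mem_insertBy before x w ys).mp hw with rfl | hw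
        · simpa using hxy
        · exact hy w hw

theorem pvPairwise_foldl_insertBy {α β : Type} [LinearOrder β] (e : α → β)
    (before : α → α → Bool) (h : ∀ a b, before a b = decide (e a < e b)) :
    ∀ (xs acc : List α), acc.Pairwise (fun a b => before b a = false) →
      (xs.foldl (fun acc x => PySem.List.insertBy before x acc) acc).Pairwise
        (fun a b => before b a = false) := by
  intro xs
  induction xs with
  | nil => intro acc hp; simpa using hp
  | cons x xs ih => intro acc hp; exact ih _ (pvPairwise_insertBy e before h x acc hp)

-- the comparator A's sort uses (key = (len(x), x))
def pvLexBefore (f g : String) : Bool :=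
  decide (PySem.Str.len f < PySem.Str.len g) ||
    (!decide (PySem.Str.len g < PySem.Str.len f) && decide (f < g))

lemma pvLexBefore_eq (f g : String) :
    pvLexBefore f g = decide (toLex (PySem.Str.len f, f) < toLex (PySem.Str.len g, g)) := by
  rw [Bool.eq_iff_iff]
  simp only [pvLexBefore, Bool.or_eq_true, Bool.and_eq_true,
    Bool.not_eq_true', decide_eq_true_eq, decide_eq_false_iff_not, not_lt,
    Prod.Lex.toLex_lt_toLex]
  constructor
  · rintro (h1 | ⟨h1, h2⟩)
    · exact Or.inl h1
    · rcases eq_or_lt_of_le h1 with h | h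
      · exact Or.inr ⟨h, h2⟩
      · exact Or.inl h
  · rintro (h1 | ⟨h1, h2⟩)
    · exact Or.inl h1
    · exact Or.inr ⟨le_of_eq h1, h2⟩

lemma pvSorted2_eq (xs : List String) :
    PySem.List.sorted2 xs (fun x => PySem.Str.len x) (fun x => x) =
      xs.foldl (fun acc x => PySem.List.insertBy pvLexBefore x acc) [] := rfl

lemma pvSortedHeadMin (xs : List String) (m : String) (t : List String)
    (hs : PySem.List.sorted2 xs (fun x => PySem.Str.len x) (fun x => x) = m :: t) :
    ∀ y ∈ xs, pvLexBefore y m = false := by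
  intro y hy
  have hperm := PySem.List.sorted2_perm xs (fun x => PySem.Str.len x) (fun x : String => x) false
  rw [hs] at hperm
  have hp := pvPairwise_foldl_insertBy (fun f : String => toLex (PySem.Str.len f, f))
    pvLexBefore pvLexBefore_eq xs [] (by simp)
  rw [← pvSorted2_eq, hs] at hp
  rcases List.mem_cons.mp (hperm.mem_iff.mpr hy) with rfl | hw
  · exact pvBefore_irrefl _ pvLexBefore pvLexBefore_eq y
  · exact (List.pairwise_cons.mp hp).1 y hw

-- small facts about the key order
lemma pvKlt_first (k l : Bool × Bool × Int × String) (h1 : k.1 = true) (h2 : l.1 = false) :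
    pvKeyLt k l = false := by
  rcases k with ⟨a1, a2, a3, a4⟩
  rcases l with ⟨b1, b2, b3, b4⟩
  simp only at h1 h2
  subst h1; subst h2
  simp [pvKeyLt]

lemma pvKlt_second (k l : Bool × Bool × Int × String) (h1 : k.1 = l.1)
    (h2 : k.2.1 = true) (h3 : l.2.1 = false) : pvKeyLt k l = false := by
  rcases k with ⟨a1, a2, a3, a4⟩
  rcases l with ⟨b1, b2, b3, b4⟩
  simp only at h1 h2 h3
  subst h1; subst h2; subst h3
  simp [pvKeyLt]

lemma pvKlt_step1 (a b c : Bool × Bool × Int × String)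
    (h1 : pvKeyLt a b = true) (h2 : pvKeyLt a c = false) : pvKeyLt b c = false := by
  rw [pvKeyLt_eq] at h1 h2 ⊢
  simp only [decide_eq_true_eq, decide_eq_false_iff_not, not_lt] at h1 h2 ⊢
  exact (h2.trans_lt h1).le

lemma pvKlt_step2 (a b c : Bool × Bool × Int × String)
    (h1 : pvKeyLt a b = false) (h2 : pvKeyLt b c = false) : pvKeyLt a c = false := by
  rw [pvKeyLt_eq] at h1 h2 ⊢
  simp only [decide_eq_false_iff_not, not_lt] at h1 h2 ⊢
  exact h2.trans h1

-- B's fold returns a member that is minimal for pvKeyLt ∘ pvKey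
lemma pvFoldMin (t : List String) (x : String) :
    (t.foldl (fun best f => if pvKeyLt (pvKey f) (pvKey best) then f else best) x) ∈ x :: t ∧
      ∀ f ∈ x :: t,
        pvKeyLt (pvKey f)
          (pvKey (t.foldl (fun best f => if pvKeyLt (pvKey f) (pvKey best) then f else best) x)) =
          false := by
  induction t generalizing x with
  | nil =>
      refine ⟨by simp, ?_⟩
      intro f hf
      simp only [List.mem_cons, List.not_mem_nil, or_false] at hf
      subst hf
      simp [pvKeyLt_eq]
  | cons h t ih =>
      simp only [List.foldl_cons]
      by_cases hc : pvKeyLt (pvKey h) (pvKey x) = true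
      · rw [if_pos hc]
        obtain ⟨ihmem, ihmin⟩ := ih h
        refine ⟨List.mem_cons_of_mem x ihmem, ?_⟩
        intro f hf
        rcases List.mem_cons.mp hf with rfl | hf2
        · exact pvKlt_step1 _ _ _ hc (ihmin h (by simp))
        · exact ihmin f hf2
      · rw [if_neg hc]
        have hc' : pvKeyLt (pvKey h) (pvKey x) = false := Bool.eq_false_iff.mpr hc
        obtain ⟨ihmem, ihmin⟩ := ih x
        refine ⟨?_, ?_⟩
        · rcases List.mem_cons.mp ihmem with hr | hr
          · rw [hr]; exact List.mem_cons_self ..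
          · exact List.mem_cons_of_mem _ (List.mem_cons_of_mem _ hr)
        · intro f hf
          rcases List.mem_cons.mp hf with rfl | hf2
          · exact ihmin f (by simp)
          · rcases List.mem_cons.mp hf2 with rfl | hf3
            · exact pvKlt_step2 _ _ _ hc' (ihmin x (by simp))
            · exact ihmin f (List.mem_cons_of_mem _ hf3)

-- with equal BRIK/NIFTI flags, minimality for A's sort key gives minimality for the full key
lemma pvLexToKlt (f m : String) (h : pvLexBefore f m = false)
    (hb : PySem.Str.isIn "BRIK" (PySem.Str.upper f) = PySem.Str.isIn "BRIK" (PySem.Str.upper m))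
    (hn : PySem.Str.isIn "NIFTI" (PySem.Str.upper f) = PySem.Str.isIn "NIFTI" (PySem.Str.upper m)) :
    pvKeyLt (pvKey f) (pvKey m) = false := by
  rw [pvLexBefore_eq] at h
  rw [pvKeyLt_eq]
  simp only [decide_eq_false_iff_not, not_lt] at h ⊢
  show pvEmb (pvKey m) ≤ pvEmb (pvKey f)
  have e1 : pvEmb (pvKey m) =
      toLex (PySem.Str.isIn "BRIK" (PySem.Str.upper m),
        toLex (!(PySem.Str.isIn "NIFTI" (PySem.Str.upper m)),
          toLex (PySem.Str.len m, m))) := rfl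
  have e2 : pvEmb (pvKey f) =
      toLex (PySem.Str.isIn "BRIK" (PySem.Str.upper f),
        toLex (!(PySem.Str.isIn "NIFTI" (PySem.Str.upper f)),
          toLex (PySem.Str.len f, f))) := rfl
  rw [e1, e2, hb, hn]
  rw [Prod.Lex.toLex_le_toLex]
  refine Or.inr ⟨rfl, ?_⟩
  rw [Prod.Lex.toLex_le_toLex]
  exact Or.inr ⟨rfl, h⟩

-- staged filtering, NIfTI level
lemma pvStage2 (files1 nifti files2 : List String)
    (h3 : nifti = files1.filter (fun f => PySem.Str.isIn "NIFTI" (PySem.Str.upper f)))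
    (h4 : files2 = if nifti ≠ [] then nifti else files1)
    (m : String) (hm : m ∈ files2) (hmin : ∀ y ∈ files2, pvLexBefore y m = false)
    (f : String) (hf : f ∈ files1)
    (hb : PySem.Str.isIn "BRIK" (PySem.Str.upper f) = PySem.Str.isIn "BRIK" (PySem.Str.upper m)) :
    pvKeyLt (pvKey f) (pvKey m) = false := by
  by_cases hni : nifti = []
  · rw [h4, if_neg (by simp [hni])] at hm hmin
    have hNm : PySem.Str.isIn "NIFTI" (PySem.Str.upper m) = false := by
      have := List.filter_eq_nil_iff.mp (h3 ▸ hni) m hm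
      simpa using this
    have hNf : PySem.Str.isIn "NIFTI" (PySem.Str.upper f) = false := by
      have := List.filter_eq_nil_iff.mp (h3 ▸ hni) f hf
      simpa using this
    exact pvLexToKlt f m (hmin f hf) hb (hNf.trans hNm.symm)
  · rw [h4, if_pos hni] at hm hmin
    have hNm : PySem.Str.isIn "NIFTI" (PySem.Str.upper m) = true := by
      have := List.mem_filter.mp (h3 ▸ hm)
      exact this.2
    by_cases hNf : PySem.Str.isIn "NIFTI" (PySem.Str.upper f) = true
    · have hfni : f ∈ nifti := by
        rw [h3]; exact List.mem_filter.mpr ⟨hf, hNf⟩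
      exact pvLexToKlt f m (hmin f hfni) hb (hNf.trans hNm.symm)
    · have hNf' : PySem.Str.isIn "NIFTI" (PySem.Str.upper f) = false := Bool.eq_false_iff.mpr hNf
      refine pvKlt_second (pvKey f) (pvKey m) hb ?_ ?_
      · show (!(PySem.Str.isIn "NIFTI" (PySem.Str.upper f))) = true
        rw [hNf']; rfl
      · show (!(PySem.Str.isIn "NIFTI" (PySem.Str.upper m))) = false
        rw [hNm]; rfl

-- staged filtering, BRIK level
lemma pvStage (files non_brik files1 nifti files2 : List String)
    (h1 : non_brik = files.filter (fun f => !(PySem.Str.isIn "BRIK" (PySem.Str.upper f))))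
    (h2 : files1 = if non_brik ≠ [] then non_brik else files)
    (h3 : nifti = files1.filter (fun f => PySem.Str.isIn "NIFTI" (PySem.Str.upper f)))
    (h4 : files2 = if nifti ≠ [] then nifti else files1)
    (m : String) (hm : m ∈ files2) (hmin : ∀ y ∈ files2, pvLexBefore y m = false)
    (f : String) (hf : f ∈ files) :
    pvKeyLt (pvKey f) (pvKey m) = false := by
  have hsub2 : files2 ⊆ files1 := by
    rw [h4]; by_cases hni : nifti = []
    · simp [hni]
    · rw [if_pos hni, h3]; exact fun a ha => (List.mem_filter.mp ha).1
  by_cases hnb : non_brik = []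
  · have hfe : files1 = files := by rw [h2, if_neg (by simp [hnb])]
    have hall : ∀ g ∈ files, PySem.Str.isIn "BRIK" (PySem.Str.upper g) = true := by
      intro g hg
      have := List.filter_eq_nil_iff.mp (h1 ▸ hnb) g hg
      simpa using this
    have hb : PySem.Str.isIn "BRIK" (PySem.Str.upper f) = PySem.Str.isIn "BRIK" (PySem.Str.upper m) := by
      rw [hall f hf, hall m (hfe ▸ hsub2 hm)]
    exact pvStage2 files1 nifti files2 h3 h4 m hm hmin f (hfe ▸ hf) hb
  · have hfe : files1 = non_brik := by rw [h2, if_pos hnb]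
    have hBm : PySem.Str.isIn "BRIK" (PySem.Str.upper m) = false := by
      have := List.mem_filter.mp (h1 ▸ hfe ▸ hsub2 hm)
      simpa using this.2
    by_cases hBf : PySem.Str.isIn "BRIK" (PySem.Str.upper f) = true
    · exact pvKlt_first (pvKey f) (pvKey m) hBf hBm
    · have hBf' : PySem.Str.isIn "BRIK" (PySem.Str.upper f) = false := Bool.eq_false_iff.mpr hBf
      have hfnb : f ∈ files1 := by
        rw [hfe, h1]
        refine List.mem_filter.mpr ⟨hf, ?_⟩
        rw [hBf']; rfl
      exact pvStage2 files1 nifti files2 h3 h4 m hm hmin f hfnb (hBf'.trans hBm.symm)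

-- the main case: at least two files
lemma pvMain (x h : String) (t : List String) :
    select_preferred_file_py (x :: h :: t) = select_preferred_file_py_alt (x :: h :: t) := by
  have hne : (x :: h :: t : List String) ≠ [] := by simp
  have hlen : ¬((x :: h :: t : List String).length = 1) := by simp
  unfold select_preferred_file_py
  rw [if_neg hne, if_neg hlen]
  simp only []
  set files : List String := x :: h :: t with hfiles
  set NB := files.filter (fun f => !(PySem.Str.isIn "BRIK" (PySem.Str.upper f))) with hNB
  set F1 := if NB ≠ [] then NB else files with hF1
  set NI := F1.filter (fun f => PySem.Str.isIn "NIFTI" (PySem.Str.upper f)) with hNI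
  set F2 := if NI ≠ [] then NI else F1 with hF2
  have hF1ne : F1 ≠ [] := by
    rw [hF1]; by_cases hnb : NB = []
    · simp [hnb]
    · simp [hnb]
  have hF2ne : F2 ≠ [] := by
    rw [hF2]; by_cases hni : NI = []
    · simpa [hni] using hF1ne
    · simp [hni]
  obtain ⟨m, s, hms⟩ : ∃ m s, PySem.List.sorted2 F2 (fun x => PySem.Str.len x) (fun x => x) = m :: s := by
    have hp := PySem.List.sorted2_perm F2 (fun x => PySem.Str.len x) (fun x : String => x) false
    rcases hsor : PySem.List.sorted2 F2 (fun x => PySem.Str.len x) (fun x => x) with _ | ⟨m, s⟩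
    · rw [hsor] at hp; exact absurd hp.nil_eq.symm hF2ne
    · exact ⟨m, s, rfl⟩
  rw [hms]
  have hget : PySem.List.pyGet? (m :: s) 0 = some m := by
    simp [PySem.List.pyGet?, PySem.List.pyIdx?]
  rw [hget]
  have halt : select_preferred_file_py_alt files =
      some ((h :: t).foldl (fun best f => if pvKeyLt (pvKey f) (pvKey best) then f else best) x) := rfl
  rw [halt]
  obtain ⟨hBmem, hBmin⟩ := pvFoldMin (h :: t) x
  have hperm := PySem.List.sorted2_perm F2 (fun x => PySem.Str.len x) (fun x : String => x) false
  rw [hms] at hperm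
  have hAmem : m ∈ F2 := hperm.mem_iff.mp (by simp)
  have hAmin := pvSortedHeadMin F2 m s hms
  have hsub2 : F2 ⊆ F1 := by
    by_cases hni : NI = []
    · rw [hF2, if_neg (by simp [hni])]
      exact fun a ha => ha
    · rw [hF2, if_pos hni, hNI]; exact fun a ha => (List.mem_filter.mp ha).1
  have hsub1 : F1 ⊆ files := by
    by_cases hnb : NB = []
    · rw [hF1, if_neg (by simp [hnb])]
      exact fun a ha => ha
    · rw [hF1, if_pos hnb, hNB]; exact fun a ha => (List.mem_filter.mp ha).1
  have hmf : m ∈ files := hsub1 (hsub2 hAmem)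
  have hstage : ∀ f ∈ files, pvKeyLt (pvKey f) (pvKey m) = false :=
    fun f hf => pvStage files NB F1 NI F2 hNB hF1 hNI hF2 m hAmem hAmin f hf
  have h1 := hstage _ hBmem
  have h2 := hBmin m hmf
  have hk := pvKeyLt_connex _ _ h2 h1
  have hmr : m = (h :: t).foldl (fun best f => if pvKeyLt (pvKey f) (pvKey best) then f else best) x :=
    congrArg (fun k => k.2.2.2) hk
  rw [hmr]

-- ===== VERDICT (by name: the statement is the Claim_ definition above) =====
theorem select_preferred_file_py_spec : Claim_equal_select_preferred_file_py := by
  intro files _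
  unfold Spec_select_preferred_file_py
  match files with
  | [] => rfl
  | [x] => rfl
  | x :: h :: t => exact pvMain x h t
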